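-- pv_equiv track=rewrite | github.com/fsgoncalves/faturai-app | scripts/processors/nubank.py | classificar_categoria
-- ===== SOURCE A (Python) =====
-- def classificar_categoria(title):
--     title = str(title).lower()
--
--     if any(x in title for x in ["farmacia", "dimed", "panvel", "raia"]):
--         return "Farmácia"
--     elif any(x in title for x in ["bourbon", "carrefour", "lahude", "cestto", "zaffari", "pkr comercio"]):
--         return "Mercado"
--     elif any(x in title for x in ["clinica de vacinas", "colchoes ortobom"]):
--         return "Saúde"
--     elif any(x in title for x in ["belshop", "oboticario", "perfumes e prese"]):
--         return "Beleza"
--     elif any(x in title for x in ["aquila", "produtos globo", "amazon", "multiplos esportes", "villaggio", "pampa burguer"]):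
--         return "Lazer"
--     elif any(x in title for x in ["kiwify", "google one", "nio fibra"]):
--         return "Educação"
--     elif any(x in title for x in ["lojas renner", "shein"]):
--         return "Vestuário"
--     elif any(x in title for x in ["lyon park", "sigapay"]):
--         return "Estacionamento"
--     elif any(x in title for x in ["surdinas car"]):
--         return "Manutenção Veicular"
--     elif any(x in title for x in ["centervatti"]):
--         return "Manutenção Predial"
--     elif any(x in title for x in ["uber"]):
--         return "Mobilidade"
--     elif any(x in title for x in ["mercadolivre", "motorola", "conta vivo"]):
--         return "Compras Online"
--     else:
--         return "Outros"
-- ===== SOURCE B (Python) =====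
-- RULES = [
--     ("Farmácia", ["farmacia", "dimed", "panvel", "raia"]),
--     ("Mercado", ["bourbon", "carrefour", "lahude", "cestto", "zaffari", "pkr comercio"]),
--     ("Saúde", ["clinica de vacinas", "colchoes ortobom"]),
--     ("Beleza", ["belshop", "oboticario", "perfumes e prese"]),
--     ("Lazer", ["aquila", "produtos globo", "amazon", "multiplos esportes", "villaggio", "pampa burguer"]),
--     ("Educação", ["kiwify", "google one", "nio fibra"]),
--     ("Vestuário", ["lojas renner", "shein"]),
--     ("Estacionamento", ["lyon park", "sigapay"]),
--     ("Manutenção Veicular", ["surdinas car"]),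
--     ("Manutenção Predial", ["centervatti"]),
--     ("Mobilidade", ["uber"]),
--     ("Compras Online", ["mercadolivre", "motorola", "conta vivo"]),
-- ]
--
-- # Flat inverted index: keyword -> (priority, category).
-- KEYWORD_TABLE = {kw: (prio, cat) for prio, (cat, kws) in enumerate(RULES) for kw in kws}
--
--
-- def classificar_categoria(title):
--     title = str(title).lower()
--     # One flat pass over ALL keywords, keeping the minimum-priority hit
--     # (no early return, no per-category branching).
--     best = None
--     for kw, (prio, cat) in KEYWORD_TABLE.items():
--         if kw in title and (best is None or prio < best[0]):
--             best = (prio, cat)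
--     return "Outros" if best is None else best[1]
-- ===== Notes on version B (the rewrite author's own statement) =====
-- stated objective: alternative
-- what changed: Replaces the 12-branch first-match if/elif chain by a flat inverted index keyword->(priority,category) scanned in ONE pass with a min-priority accumulator and no early return; correctness: the minimum-priority matching keyword belongs to the first matching category of A's chain.
import Mathlib
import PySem

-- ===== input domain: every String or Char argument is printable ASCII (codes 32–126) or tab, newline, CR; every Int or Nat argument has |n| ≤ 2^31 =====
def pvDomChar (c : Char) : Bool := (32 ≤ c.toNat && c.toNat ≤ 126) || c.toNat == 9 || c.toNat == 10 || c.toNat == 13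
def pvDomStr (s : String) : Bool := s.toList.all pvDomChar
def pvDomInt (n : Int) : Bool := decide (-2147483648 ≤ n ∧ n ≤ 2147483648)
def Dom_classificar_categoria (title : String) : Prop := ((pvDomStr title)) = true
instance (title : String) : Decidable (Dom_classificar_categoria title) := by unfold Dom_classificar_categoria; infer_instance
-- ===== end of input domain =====

-- B replaces A's first-match if/elif chain by one flat pass over an inverted
-- keyword index keeping the minimum-priority hit; objective: alternative.

-- ===== PORT A =====
def classificar_categoria (title : String) : String :=
  let title := PySem.Str.lower title
  if (["farmacia", "dimed", "panvel", "raia"].any (fun x => PySem.Str.isIn x title)) then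
    "Farmácia"
  else if (["bourbon", "carrefour", "lahude", "cestto", "zaffari", "pkr comercio"].any (fun x => PySem.Str.isIn x title)) then
    "Mercado"
  else if (["clinica de vacinas", "colchoes ortobom"].any (fun x => PySem.Str.isIn x title)) then
    "Saúde"
  else if (["belshop", "oboticario", "perfumes e prese"].any (fun x => PySem.Str.isIn x title)) then
    "Beleza"
  else if (["aquila", "produtos globo", "amazon", "multiplos esportes", "villaggio", "pampa burguer"].any (fun x => PySem.Str.isIn x title)) then
    "Lazer"
  else if (["kiwify", "google one", "nio fibra"].any (fun x => PySem.Str.isIn x title)) then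
    "Educação"
  else if (["lojas renner", "shein"].any (fun x => PySem.Str.isIn x title)) then
    "Vestuário"
  else if (["lyon park", "sigapay"].any (fun x => PySem.Str.isIn x title)) then
    "Estacionamento"
  else if (["surdinas car"].any (fun x => PySem.Str.isIn x title)) then
    "Manutenção Veicular"
  else if (["centervatti"].any (fun x => PySem.Str.isIn x title)) then
    "Manutenção Predial"
  else if (["uber"].any (fun x => PySem.Str.isIn x title)) then
    "Mobilidade"
  else if (["mercadolivre", "motorola", "conta vivo"].any (fun x => PySem.Str.isIn x title)) then
    "Compras Online"
  else
    "Outros"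

-- ===== PORT B =====
def pvRulesB : List (String × List String) :=
  [("Farmácia", ["farmacia", "dimed", "panvel", "raia"]),
   ("Mercado", ["bourbon", "carrefour", "lahude", "cestto", "zaffari", "pkr comercio"]),
   ("Saúde", ["clinica de vacinas", "colchoes ortobom"]),
   ("Beleza", ["belshop", "oboticario", "perfumes e prese"]),
   ("Lazer", ["aquila", "produtos globo", "amazon", "multiplos esportes", "villaggio", "pampa burguer"]),
   ("Educação", ["kiwify", "google one", "nio fibra"]),
   ("Vestuário", ["lojas renner", "shein"]),
   ("Estacionamento", ["lyon park", "sigapay"]),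
   ("Manutenção Veicular", ["surdinas car"]),
   ("Manutenção Predial", ["centervatti"]),
   ("Mobilidade", ["uber"]),
   ("Compras Online", ["mercadolivre", "motorola", "conta vivo"])]

-- the dict comprehension: keyword -> (priority, category), in insertion order
def pvFlatten : Nat → List (String × List String) → List (String × Nat × String)
  | _, [] => []
  | p, (cat, kws) :: rest => (kws.map (fun kw => (kw, p, cat))) ++ pvFlatten (p + 1) rest

def pvKeywordTable : List (String × Nat × String) := pvFlatten 0 pvRulesB

-- the loop body: keep the minimum-priority matching keyword
def pvStep (t : String) (best : Option (Nat × String)) (e : String × Nat × String) :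
    Option (Nat × String) :=
  if PySem.Str.isIn e.1 t && (match best with | none => true | some b => decide (e.2.1 < b.1)) then
    some e.2
  else best

def classificar_categoria_alt (title : String) : String :=
  let t := PySem.Str.lower title
  match pvKeywordTable.foldl (pvStep t) none with
  | none => "Outros"
  | some b => b.2

-- ===== PRECONDITION & SPEC =====
def Spec_classificar_categoria (title : String) (out : String) : Prop := out = classificar_categoria_alt title
instance (title : String) (out : String) : Decidable (Spec_classificar_categoria title out) := by unfold Spec_classificar_categoria; infer_instance

-- ===== CLAIM (what is proved, stated in full; the proofs are below) =====
def Claim_equal_classificar_categoria : Prop := ∀ (title : String), Dom_classificar_categoria title → Spec_classificar_categoria title (classificar_categoria title)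

-- ===== LEMMAS AND PROOFS =====

-- priorities in pvFlatten p rules are all ≥ p
theorem pvFlatten_prio_ge (p : Nat) (rules : List (String × List String)) :
    ∀ e ∈ pvFlatten p rules, p ≤ e.2.1 := by
  induction rules generalizing p with
  | nil => intro e h; simp [pvFlatten] at h
  | cons r rest ih =>
    intro e h
    simp only [pvFlatten, List.mem_append, List.mem_map] at h
    rcases h with ⟨kw, _, rfl⟩ | h
    · exact Nat.le_refl p
    · exact Nat.le_trans (Nat.le_succ p) (ih (p + 1) e h)

-- an accumulator with priority ≤ every entry is never replaced
theorem pv_fold_absorb (t : String) (i : Nat) (c : String)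
    (l : List (String × Nat × String)) (h : ∀ e ∈ l, i ≤ e.2.1) :
    l.foldl (pvStep t) (some (i, c)) = some (i, c) := by
  induction l with
  | nil => rfl
  | cons e rest ih =>
    have he : i ≤ e.2.1 := h e (List.mem_cons_self ..)
    have hlt : decide (e.2.1 < i) = false := decide_eq_false (Nat.not_lt.mpr he)
    have hstep : pvStep t (some (i, c)) e = some (i, c) := by
      simp only [pvStep, hlt, Bool.and_false, Bool.false_eq_true, if_false]
    rw [List.foldl_cons, hstep]
    exact ih (fun e' h' => h e' (List.mem_cons_of_mem _ h'))

-- folding one category's keyword group from none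
theorem pv_fold_group (t : String) (p : Nat) (c : String) (kws : List String) :
    (kws.map (fun kw => (kw, p, c))).foldl (pvStep t) none =
      (if kws.any (fun kw => PySem.Str.isIn kw t) then some (p, c) else none) := by
  induction kws with
  | nil => rfl
  | cons k rest ih =>
    by_cases hk : PySem.Str.isIn k t = true
    · have h1 : pvStep t none (k, p, c) = some (p, c) := by
        simp only [pvStep, hk, Bool.true_and, if_true]
      have h2 : (rest.map (fun kw => (kw, p, c))).foldl (pvStep t) (some (p, c)) = some (p, c) := by
        apply pv_fold_absorb
        intro e he
        simp only [List.mem_map] at he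
        rcases he with ⟨kw, _, rfl⟩
        exact Nat.le_refl p
      simp only [List.map_cons, List.foldl_cons, h1, h2, List.any_cons, hk, Bool.true_or, if_true]
    · have hk' : PySem.Str.isIn k t = false := Bool.eq_false_iff.mpr hk
      have h1 : pvStep t none (k, p, c) = none := by
        simp only [pvStep, hk', Bool.false_and, Bool.false_eq_true, if_false]
      simp only [List.map_cons, List.foldl_cons, h1, ih, List.any_cons, hk', Bool.false_or]

-- first-match reading of the one-pass min-priority fold
def pvFirstMatch (t : String) : List (String × List String) → String
  | [] => "Outros"
  | (cat, kws) :: rest =>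
      if kws.any (fun kw => PySem.Str.isIn kw t) then cat else pvFirstMatch t rest

theorem pv_fold_eq_first (t : String) (p : Nat) (rules : List (String × List String)) :
    (match (pvFlatten p rules).foldl (pvStep t) none with
      | none => "Outros"
      | some b => b.2) = pvFirstMatch t rules := by
  induction rules generalizing p with
  | nil => rfl
  | cons r rest ih =>
    obtain ⟨cat, kws⟩ := r
    simp only [pvFlatten, List.foldl_append, pv_fold_group, pvFirstMatch]
    by_cases h : kws.any (fun kw => PySem.Str.isIn kw t) = true
    · simp only [h, if_true]
      rw [pv_fold_absorb t p cat _ (fun e he => Nat.le_trans (Nat.le_succ p)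
        (pvFlatten_prio_ge (p + 1) rest e he))]
    · simp only [h, if_false, Bool.false_eq_true]
      exact ih (p + 1)

-- ===== VERDICT (by name: the statement is the Claim_ definition above) =====
theorem classificar_categoria_spec : Claim_equal_classificar_categoria := by
  intro title _
  unfold Spec_classificar_categoria classificar_categoria_alt pvKeywordTable
  rw [pv_fold_eq_first]
  simp only [pvRulesB, pvFirstMatch, classificar_categoria]
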